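-- pv_equiv track=rewrite | github.com/dan-1am/aigob | aigob.py | split_to_paragraphs
-- ===== SOURCE A (Python) =====
-- def split_to_paragraphs(text):
--     """Generator, split text maintaining its length."""
--     pos = 0
--     while True:
--         end = text.find("\n\n", pos)
--         if end < 0:
--             yield text[pos:]
--             break
--         cr_pos = end+2
--         while text[cr_pos:cr_pos+1] == "\n":
--             cr_pos += 1
--         extra = cr_pos-end-2
--         yield text[pos:end]+" "*extra
--         pos = cr_pos
-- ===== SOURCE B (Python) =====
-- def split_to_paragraphs(text):
--     """Generator, split text maintaining its length.
--
--     One forward pass with a newline-run counter: a run of 2+ newlines ends a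
--     paragraph, the newlines beyond the first two become trailing spaces.
--     """
--     seg = []
--     run = 0
--     for c in text:
--         if c == '\n':
--             run += 1
--         else:
--             if run >= 2:
--                 yield ''.join(seg) + ' ' * (run - 2)
--                 seg = [c]
--             else:
--                 seg.append('\n' * run + c)
--             run = 0
--     if run >= 2:
--         yield ''.join(seg) + ' ' * (run - 2)
--         yield ''
--     else:
--         yield ''.join(seg) + '\n' * run
-- ===== Notes on version B (the rewrite author's own statement) =====
-- stated objective: alternative
-- what changed: Replaced A's repeated substring-find for the blank-line separator plus an inner index-advancing while over each newline run by a single forward fold over the characters that carries (current segment, current newline-run length) and emits a paragraph whenever a run of 2+ newlines ends.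
import Mathlib
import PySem

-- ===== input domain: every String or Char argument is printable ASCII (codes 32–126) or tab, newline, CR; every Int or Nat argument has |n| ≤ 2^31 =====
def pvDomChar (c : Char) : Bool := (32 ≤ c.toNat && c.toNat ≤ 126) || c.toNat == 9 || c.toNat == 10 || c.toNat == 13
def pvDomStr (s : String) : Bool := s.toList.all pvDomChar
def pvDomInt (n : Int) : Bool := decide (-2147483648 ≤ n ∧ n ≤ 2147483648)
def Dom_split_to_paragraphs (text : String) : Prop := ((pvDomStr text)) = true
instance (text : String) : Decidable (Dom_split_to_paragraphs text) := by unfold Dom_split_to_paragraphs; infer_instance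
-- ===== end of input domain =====

-- B replaces A's find/inner-while index scanning by a single forward fold with a
-- newline-run counter (objective: alternative/idiomatic single pass).
-- Both Pythons are generators; equivalence is about the list of yielded strings.

-- ===== PORT A =====
-- Inner 'while text[cr_pos:cr_pos+1] == "\n": cr_pos += 1'.
-- (text[i:i+1] == "\n" is exactly t[i]? = some '\n'; ported by hand, exact.)
def crSkip (t : List Char) (i : Nat) : Nat :=
  if h : t[i]? = some '\n' then crSkip t (i + 1) else i
termination_by t.length - i
decreasing_by
  have : i < t.length := List.getElem?_eq_some_iff.mp h |>.1
  omega

-- cited by aLoop's decreasing_by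
theorem crSkip_ge (t : List Char) (i : Nat) : i ≤ crSkip t i := by
  unfold crSkip
  split
  · have h := crSkip_ge t (i + 1); omega
  · omega
termination_by t.length - i
decreasing_by
  rename_i h
  have : i < t.length := List.getElem?_eq_some_iff.mp h |>.1
  omega

-- A's 'while True' loop; the loop variable pos is carried as the remaining
-- suffix rest = text[pos:], so text.find("\n\n", pos) is find on rest,
-- text[pos:end] is rest.take, and the next pos is rest.drop cr.
def aLoop (rest : List Char) : List String :=
  let e := PySem.Chars.find rest ['\n', '\n']
  if e < 0 then
    [String.ofList rest]
  else
    let en := e.toNat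
    let cr := crSkip rest (en + 2)
    let extra := cr - en - 2
    String.ofList (rest.take en ++ List.replicate extra ' ') :: aLoop (rest.drop cr)
termination_by rest.length
decreasing_by
  rename_i h
  have hin : ['\n', '\n'] <:+: rest := ((PySem.Chars.find_nonneg_iff rest ['\n', '\n']).mp (by omega))
  have hlen : 2 ≤ rest.length := by simpa using hin.length_le
  have hge := crSkip_ge rest ((PySem.Chars.find rest ['\n', '\n']).toNat + 2)
  simp only [List.length_drop]
  omega

def split_to_paragraphs (text : String) : List String := aLoop text.toList

-- ===== PORT B =====
-- state = (yielded so far, current segment, current newline-run length)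
def bStep (st : List String × List Char × Nat) (c : Char) : List String × List Char × Nat :=
  let (out, seg, run) := st
  if c = '\n' then (out, seg, run + 1)
  else if 2 ≤ run then
    (out ++ [String.ofList (seg ++ List.replicate (run - 2) ' ')], [c], 0)
  else (out, seg ++ List.replicate run '\n' ++ [c], 0)

-- the yields after the for-loop
def bFin (st : List String × List Char × Nat) : List String :=
  let (out, seg, run) := st
  if 2 ≤ run then out ++ [String.ofList (seg ++ List.replicate (run - 2) ' '), ""]
  else out ++ [String.ofList (seg ++ List.replicate run '\n')]

def split_to_paragraphs_alt (text : String) : List String :=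
  bFin (text.toList.foldl bStep ([], [], 0))

-- ===== PRECONDITION & SPEC =====
def Spec_split_to_paragraphs (text : String) (out : List String) : Prop := out = split_to_paragraphs_alt text
instance (text : String) (out : List String) : Decidable (Spec_split_to_paragraphs text out) := by unfold Spec_split_to_paragraphs; infer_instance

-- ===== CLAIM (what is proved, stated in full; the proofs are below) =====
def Claim_equal_split_to_paragraphs : Prop := ∀ (text : String), Dom_split_to_paragraphs text → Spec_split_to_paragraphs text (split_to_paragraphs text)

-- ===== LEMMAS AND PROOFS =====

-- leading newline-run length
def nlRun : List Char → Nat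
  | [] => 0
  | c :: r => if c = '\n' then nlRun r + 1 else 0

theorem crSkip_eq (t : List Char) (i : Nat) : crSkip t i = i + nlRun (t.drop i) := by
  unfold crSkip
  split
  · rename_i h
    obtain ⟨hlt, hget⟩ := List.getElem?_eq_some_iff.mp h
    have hdrop : t.drop i = '\n' :: t.drop (i + 1) := by
      rw [← List.getElem_cons_drop hlt, hget]
    rw [crSkip_eq t (i + 1), hdrop]
    simp [nlRun]; omega
  · rename_i h
    rcases hd : t.drop i with _ | ⟨c, r⟩
    · simp [nlRun]
    · have : t[i]? = some c := by
        have := congrArg (·[0]?) hd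
        simpa [List.getElem?_drop] using this
      have hc : ¬ c = '\n' := fun hc => h (by rw [this, hc])
      simp [nlRun, hc]
termination_by t.length - i
decreasing_by
  rename_i h
  have : i < t.length := List.getElem?_eq_some_iff.mp h |>.1
  omega

-- prepend seg to the first paragraph
def consSeg (seg : List Char) : List String → List String
  | s :: ss => String.ofList (seg ++ s.toList) :: ss
  | [] => []

theorem consSeg_consSeg (a b : List Char) (l : List String) :
    consSeg a (consSeg b l) = consSeg (a ++ b) l := by
  cases l <;> simp [consSeg]

theorem consSeg_nil (l : List String) : consSeg [] l = l := by
  cases l <;> simp [consSeg]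

-- A on a suffix with no "\n\n"
theorem aLoop_no_infix (t : List Char) (h : ¬ ['\n', '\n'] <:+: t) :
    aLoop t = [String.ofList t] := by
  rw [aLoop]
  have : PySem.Chars.find t ['\n', '\n'] = -1 := (PySem.Chars.find_eq_neg_one_iff _ _).mpr h
  simp [this]

-- A commutes with prepending a char that starts no "\n\n"
theorem aLoop_cons (c : Char) (rest : List Char) (h : ¬ ['\n', '\n'] <+: c :: rest) :
    aLoop (c :: rest) = consSeg [c] (aLoop rest) := by
  by_cases hin : ['\n', '\n'] <:+: rest
  · have he : 0 ≤ PySem.Chars.find rest ['\n', '\n'] := (PySem.Chars.find_nonneg_iff _ _).mpr hin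
    have he1 : 0 ≤ PySem.Chars.find (c :: rest) ['\n', '\n'] :=
      (PySem.Chars.find_nonneg_iff _ _).mpr (List.infix_cons_iff.mpr (Or.inr hin))
    obtain ⟨hpre, hmin⟩ := PySem.Chars.find_spec he
    obtain ⟨hpre1, hmin1⟩ := PySem.Chars.find_spec he1
    set e := (PySem.Chars.find rest ['\n', '\n']).toNat with hedef
    set e1 := (PySem.Chars.find (c :: rest) ['\n', '\n']).toNat with he1def
    have hne0 : e1 ≠ 0 := by
      intro h0
      rw [h0] at hpre1
      exact h (by simpa using hpre1)
    have hd1 : (c :: rest).drop e1 = rest.drop (e1 - 1) := by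
      rcases Nat.exists_eq_succ_of_ne_zero hne0 with ⟨k, hk⟩
      simp [hk]
    have h1 : e ≤ e1 - 1 := by
      by_contra hlt
      exact hmin (e1 - 1) (by omega) (by rwa [hd1] at hpre1)
    have h2 : ¬ (e + 1 < e1) := fun hlt => hmin1 (e + 1) hlt (by simpa using hpre)
    have hee : e1 = e + 1 := by omega
    rw [aLoop, aLoop]
    rw [if_neg (by omega), if_neg (by omega)]
    dsimp only
    rw [consSeg]
    rw [← hedef, ← he1def, hee]
    have ha : e + 1 + 2 = e + 2 + 1 := by omega
    have hcr' : crSkip (c :: rest) (e + 1 + 2) = crSkip rest (e + 2) + 1 := by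
      rw [ha, crSkip_eq, crSkip_eq, List.drop_succ_cons]
      omega
    rw [hcr']
    have h3 : crSkip rest (e + 2) + 1 - (e + 1) - 2 = crSkip rest (e + 2) - e - 2 := by
      omega
    rw [h3, List.take_succ_cons, List.drop_succ_cons]
    simp
  · have hnin : ¬ ['\n', '\n'] <:+: c :: rest := by
      intro hi
      rcases List.infix_cons_iff.mp hi with hp | hi'
      · exact h hp
      · exact hin hi'
    rw [aLoop_no_infix _ hnin, aLoop_no_infix _ hin]
    simp [consSeg]

-- A at a "\n\n" boundary
theorem aLoop_two_nl (r : List Char) :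
    aLoop ('\n' :: '\n' :: r) =
      String.ofList (List.replicate (nlRun r) ' ') :: aLoop (r.drop (nlRun r)) := by
  have he1 : 0 ≤ PySem.Chars.find ('\n' :: '\n' :: r) ['\n', '\n'] :=
    (PySem.Chars.find_nonneg_iff _ _).mpr (List.infix_cons_iff.mpr (Or.inl ⟨r, rfl⟩))
  obtain ⟨hpre1, hmin1⟩ := PySem.Chars.find_spec he1
  have he0 : (PySem.Chars.find ('\n' :: '\n' :: r) ['\n', '\n']).toNat = 0 := by
    by_contra h0
    exact hmin1 0 (by omega) ⟨r, rfl⟩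
  rw [aLoop]
  rw [if_neg (by omega), he0]
  dsimp only
  have hcr : crSkip ('\n' :: '\n' :: r) (0 + 2) = 2 + nlRun r := by
    rw [crSkip_eq]; simp
  rw [hcr]
  have h2 : 2 + nlRun r - 0 - 2 = nlRun r := by omega
  have h3 : 2 + nlRun r = nlRun r + 1 + 1 := by omega
  rw [h2, h3, List.drop_succ_cons, List.drop_succ_cons]
  simp

-- the two fold invariants at the empty suffix
theorem main_nil :
    (∀ (out : List String) (seg : List Char) (run : Nat), run ≤ 1 →
      bFin (([] : List Char).foldl bStep (out, seg, run)) =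
        out ++ consSeg seg (aLoop (List.replicate run '\n' ++ []))) ∧
    (∀ (out : List String) (seg : List Char) (m : Nat), 2 ≤ m →
      bFin (([] : List Char).foldl bStep (out, seg, m)) =
        out ++ String.ofList (seg ++ List.replicate (m - 2 + nlRun []) ' ')
          :: aLoop (([] : List Char).drop (nlRun []))) := by
  constructor
  · intro out seg run h
    have hni : ¬ ['\n', '\n'] <:+: (List.replicate run '\n' ++ []) := by
      intro hi
      have := hi.length_le
      simp at this
      omega
    rw [aLoop_no_infix _ hni]
    simp only [List.foldl_nil, bFin]
    rw [if_neg (by omega)]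
    simp [consSeg]
  · intro out seg m hm
    have ha : aLoop ([] : List Char) = [String.ofList []] := aLoop_no_infix [] (by simp)
    simp only [List.foldl_nil, bFin, nlRun, List.drop_nil]
    rw [if_pos (by omega), ha]
    simp

-- the combined loop invariant for B's fold, by strong induction on the suffix
theorem main_invariant : ∀ n (t : List Char), t.length ≤ n →
    (∀ out seg run, run ≤ 1 →
      bFin (t.foldl bStep (out, seg, run)) =
        out ++ consSeg seg (aLoop (List.replicate run '\n' ++ t))) ∧
    (∀ out seg m, 2 ≤ m →
      bFin (t.foldl bStep (out, seg, m)) =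
        out ++ String.ofList (seg ++ List.replicate (m - 2 + nlRun t) ' ')
          :: aLoop (t.drop (nlRun t))) := by
  intro n
  induction n with
  | zero =>
    intro t ht
    have ht0 : t = [] := List.length_eq_zero_iff.mp (by omega)
    subst ht0
    exact main_nil
  | succ n ih =>
    intro t ht
    match t with
    | [] => exact main_nil
    | c :: rest =>
      have hr : rest.length ≤ n := by
        simp at ht
        omega
      constructor
      · intro out seg run hrun
        simp only [List.foldl_cons]
        by_cases hc : c = '\n'
        · subst hc
          interval_cases run
          · have hb : bStep (out, seg, 0) '\n' = (out, seg, 1) := by simp [bStep]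
            rw [hb, (ih rest hr).1 out seg 1 (by omega)]
            simp
          · have hb : bStep (out, seg, 1) '\n' = (out, seg, 2) := by simp [bStep]
            rw [hb, (ih rest hr).2 out seg 2 (by omega)]
            rw [show (List.replicate 1 '\n' ++ '\n' :: rest) = '\n' :: '\n' :: rest by simp]
            rw [aLoop_two_nl]
            simp [consSeg]
        · have hlt : ¬ 2 ≤ run := by omega
          have hb : bStep (out, seg, run) c =
              (out, seg ++ List.replicate run '\n' ++ [c], 0) := by
            simp [bStep, hc, hlt]
          rw [hb, (ih rest hr).1 _ _ 0 (by omega)]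
          rw [show (List.replicate 0 '\n' ++ rest) = rest by simp]
          have hnp : ¬ ['\n', '\n'] <+: c :: rest := by
            intro hp
            exact hc (List.cons_prefix_cons.mp hp).1.symm
          interval_cases run
          · rw [show (List.replicate 0 '\n' ++ c :: rest) = c :: rest by simp]
            rw [aLoop_cons c rest hnp, consSeg_consSeg]
            simp
          · rw [show (List.replicate 1 '\n' ++ c :: rest) = '\n' :: c :: rest by simp]
            have hnp2 : ¬ ['\n', '\n'] <+: '\n' :: c :: rest := by
              intro hp
              exact hc (List.cons_prefix_cons.mp (List.cons_prefix_cons.mp hp).2).1.symm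
            rw [aLoop_cons _ _ hnp2, aLoop_cons c rest hnp, consSeg_consSeg, consSeg_consSeg]
            simp
      · intro out seg m hm
        simp only [List.foldl_cons]
        by_cases hc : c = '\n'
        · subst hc
          have hb : bStep (out, seg, m) '\n' = (out, seg, m + 1) := by simp [bStep]
          rw [hb, (ih rest hr).2 out seg (m + 1) (by omega)]
          have h1 : nlRun ('\n' :: rest) = nlRun rest + 1 := by simp [nlRun]
          have h2 : m - 2 + (nlRun rest + 1) = m + 1 - 2 + nlRun rest := by omega
          rw [h1, h2, List.drop_succ_cons]
        · have hb : bStep (out, seg, m) c =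
              (out ++ [String.ofList (seg ++ List.replicate (m - 2) ' ')], [c], 0) := by
            simp [bStep, hc, hm]
          rw [hb, (ih rest hr).1 _ [c] 0 (by omega)]
          rw [show (List.replicate 0 '\n' ++ rest) = rest by simp]
          have hnp : ¬ ['\n', '\n'] <+: c :: rest := by
            intro hp
            exact hc (List.cons_prefix_cons.mp hp).1.symm
          have h1 : nlRun (c :: rest) = 0 := by simp [nlRun, hc]
          rw [h1, List.drop_zero, aLoop_cons c rest hnp]
          simp

-- ===== VERDICT (by name: the statement is the Claim_ definition above) =====
theorem split_to_paragraphs_spec : Claim_equal_split_to_paragraphs := by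
  intro text _
  show split_to_paragraphs text = split_to_paragraphs_alt text
  unfold split_to_paragraphs split_to_paragraphs_alt
  have h := (main_invariant text.toList.length text.toList le_rfl).1 [] [] 0 (by omega)
  simpa [consSeg_nil] using h.symm
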